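-- pv_equiv track=rewrite | github.com/shenyangHuang/TGB | tgb_modules/timetraveler_trainertester.py | getRelEntCooccurrence
-- ===== SOURCE A (Python) =====
-- def getRelEntCooccurrence(quadruples, num_rels):
--     """Used for Inductive-Mean. Get co-occurrence in the training set.
--     https://github.com/JHL-HUST/TITer/blob/master/dataset/baseDataset.py
--     from Timetraveler
--     return:
--         {'subject': a dict[key -> relation, values -> a set of co-occurrence subject entities],
--             'object': a dict[key -> relation, values -> a set of co-occurrence object entities],}
--     """
--     relation_entities_s = {}
--     relation_entities_o = {}
--     for ex in quadruples:
--         s, r, o = ex[0], ex[1], ex[2]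
--         reversed_r = r + num_rels + 1
--         if r not in relation_entities_s.keys():
--             relation_entities_s[r] = set()
--         relation_entities_s[r].add(s)
--         if r not in relation_entities_o.keys():
--             relation_entities_o[r] = set()
--         relation_entities_o[r].add(o)
--
--         if reversed_r not in relation_entities_s.keys():
--             relation_entities_s[reversed_r] = set()
--         relation_entities_s[reversed_r].add(o)
--         if reversed_r not in relation_entities_o.keys():
--             relation_entities_o[reversed_r] = set()
--         relation_entities_o[reversed_r].add(s)
--     return {'subject': relation_entities_s, 'object': relation_entities_o}
-- ===== SOURCE B (Python) =====
-- def getRelEntCooccurrence(quadruples, num_rels):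
--     """Two-stage brute force instead of incremental dict building: first collect
--     the distinct relation keys in first-occurrence order, then compute each key's
--     subject/object entity sets by a full filtering scan over the quadruples."""
--     keys = []
--     for ex in quadruples:
--         for k in (ex[1], ex[1] + num_rels + 1):
--             if k not in keys:
--                 keys.append(k)
--     subjects = {}
--     objects = {}
--     for k in keys:
--         sv = []
--         ov = []
--         for ex in quadruples:
--             s, r, o = ex[0], ex[1], ex[2]
--             if r == k:
--                 sv.append(s)
--                 ov.append(o)
--             if r + num_rels + 1 == k:
--                 sv.append(o)
--                 ov.append(s)
--         subjects[k] = set(sv)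
--         objects[k] = set(ov)
--     return {'subject': subjects, 'object': objects}
-- ===== Notes on version B (the rewrite author's own statement) =====
-- stated objective: alternative
-- what changed: A builds the two dicts incrementally in one pass with four conditional set-insertions per quadruple; B is a staged brute force: a first pass collects the distinct keys in first-occurrence order, then for each key a full filtering scan over the quadruples gathers its subject/object entities, assembled into the dicts at the end.
import Mathlib
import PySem

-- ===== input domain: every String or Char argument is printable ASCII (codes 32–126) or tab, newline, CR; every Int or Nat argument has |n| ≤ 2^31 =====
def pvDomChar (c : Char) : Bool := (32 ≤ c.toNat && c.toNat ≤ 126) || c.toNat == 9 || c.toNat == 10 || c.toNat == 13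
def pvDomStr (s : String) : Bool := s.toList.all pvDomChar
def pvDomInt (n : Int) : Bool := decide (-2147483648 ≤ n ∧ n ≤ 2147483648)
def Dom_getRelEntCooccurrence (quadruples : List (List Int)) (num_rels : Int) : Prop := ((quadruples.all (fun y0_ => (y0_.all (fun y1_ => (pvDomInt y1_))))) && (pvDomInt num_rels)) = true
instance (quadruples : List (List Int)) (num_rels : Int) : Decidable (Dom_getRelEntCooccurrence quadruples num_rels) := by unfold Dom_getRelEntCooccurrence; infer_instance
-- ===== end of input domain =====

-- B replaces A's single-pass incremental dict building by a staged brute force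
-- (collect distinct keys, then one filtering scan per key); alternative decomposition, same results.

-- ===== PORT A =====
-- the Python idiom 'if k not in d: d[k] = set()' followed by 'd[k].add(x)' (A repeats it four times)
def pyDictSetAdd (d : PySem.Dict Int (PySem.Set Int)) (k : Int) (x : Int) : PySem.Dict Int (PySem.Set Int) :=
  let d := if d.contains k then d else d.insert k PySem.Set.empty
  d.insert k (PySem.Set.add (d.getD k PySem.Set.empty) x)

def getRelEntCooccurrence (quadruples : List (List Int)) (num_rels : Int) : List (String × List (Int × List Int)) :=
  let st := quadruples.foldl (fun (st : PySem.Dict Int (PySem.Set Int) × PySem.Dict Int (PySem.Set Int)) ex =>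
      let s := PySem.List.pyGetD ex 0 0
      let r := PySem.List.pyGetD ex 1 0
      let o := PySem.List.pyGetD ex 2 0
      let reversed_r := r + num_rels + 1
      let relS := pyDictSetAdd st.1 r s
      let relO := pyDictSetAdd st.2 r o
      let relS := pyDictSetAdd relS reversed_r o
      let relO := pyDictSetAdd relO reversed_r s
      (relS, relO)) (PySem.Dict.empty, PySem.Dict.empty)
  [("subject", st.1.items), ("object", st.2.items)]

-- ===== PORT B =====
def getRelEntCooccurrence_alt (quadruples : List (List Int)) (num_rels : Int) : List (String × List (Int × List Int)) :=
  -- first pass: distinct keys in first-occurrence order ('if k not in keys: keys.append(k)')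
  let keys := quadruples.foldl (fun (ks : List Int) ex =>
      [PySem.List.pyGetD ex 1 0, PySem.List.pyGetD ex 1 0 + num_rels + 1].foldl
        (fun ks k => if ks.contains k then ks else ks ++ [k]) ks) []
  -- second stage: per key, one filtering scan over all quadruples
  let st := keys.foldl (fun (st : PySem.Dict Int (PySem.Set Int) × PySem.Dict Int (PySem.Set Int)) k =>
      let vs := quadruples.foldl (fun (vs : List Int × List Int) ex =>
          let s := PySem.List.pyGetD ex 0 0
          let r := PySem.List.pyGetD ex 1 0
          let o := PySem.List.pyGetD ex 2 0
          let vs := if r == k then (vs.1 ++ [s], vs.2 ++ [o]) else vs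
          if r + num_rels + 1 == k then (vs.1 ++ [o], vs.2 ++ [s]) else vs) ([], [])
      (st.1.insert k (PySem.Set.ofList vs.1), st.2.insert k (PySem.Set.ofList vs.2)))
    (PySem.Dict.empty, PySem.Dict.empty)
  [("subject", st.1.items), ("object", st.2.items)]

-- ===== PRECONDITION & SPEC =====
-- Pre_ excludes rows shorter than 3 entries, on which the Python A raises IndexError at ex[0]/ex[1]/ex[2].
def Pre_getRelEntCooccurrence (quadruples : List (List Int)) (num_rels : Int) : Prop :=
  ∀ ex ∈ quadruples, 3 ≤ ex.length
instance (quadruples : List (List Int)) (num_rels : Int) : Decidable (Pre_getRelEntCooccurrence quadruples num_rels) := by unfold Pre_getRelEntCooccurrence; infer_instance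
def pvWitness_getRelEntCooccurrence : List (List Int) × Int := ([[0, 1, 2], [3, 1, 0]], 2)

def Spec_getRelEntCooccurrence (quadruples : List (List Int)) (num_rels : Int) (out : List (String × List (Int × List Int))) : Prop := out = getRelEntCooccurrence_alt quadruples num_rels
instance (quadruples : List (List Int)) (num_rels : Int) (out : List (String × List (Int × List Int))) : Decidable (Spec_getRelEntCooccurrence quadruples num_rels out) := by unfold Spec_getRelEntCooccurrence; infer_instance

-- ===== CLAIM (what is proved, stated in full; the proofs are below) =====
def Claim_equal_getRelEntCooccurrence : Prop := ∀ (quadruples : List (List Int)) (num_rels : Int), Dom_getRelEntCooccurrence quadruples num_rels → Pre_getRelEntCooccurrence quadruples num_rels → Spec_getRelEntCooccurrence quadruples num_rels (getRelEntCooccurrence quadruples num_rels)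

-- ===== LEMMAS AND PROOFS =====

-- the (relation, subject-value, object-value) event stream both programs process
def pvEv (num_rels : Int) (ex : List Int) : List (Int × Int × Int) :=
  [(PySem.List.pyGetD ex 1 0, PySem.List.pyGetD ex 0 0, PySem.List.pyGetD ex 2 0),
   (PySem.List.pyGetD ex 1 0 + num_rels + 1, PySem.List.pyGetD ex 2 0, PySem.List.pyGetD ex 0 0)]

def pvEvs (quadruples : List (List Int)) (num_rels : Int) : List (Int × Int × Int) :=
  quadruples.flatMap (pvEv num_rels)

-- the common normal form: distinct keys in first-occurrence order, each with its filtered value set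
def pvC (proj : Int × Int × Int → Int) (quadruples : List (List Int)) (num_rels : Int) : List (Int × List Int) :=
  (PySem.Set.ofList ((pvEvs quadruples num_rels).map Prod.fst)).map
    (fun k => (k, PySem.Set.ofList (((pvEvs quadruples num_rels).filter (fun e => e.1 == k)).map proj)))

-- characterisation of a pyDictSetAdd fold: items = distinct keys, each with the set of its filtered values
theorem pv_main (E : List (Int × Int)) :
    (E.foldl (fun d e => pyDictSetAdd d e.1 e.2) PySem.Dict.empty).items
      = (PySem.Set.ofList (E.map Prod.fst)).map
          (fun k => (k, PySem.Set.ofList ((E.filter (fun e => e.1 == k)).map Prod.snd))) := by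
  induction E using List.reverseRecOn with
  | nil => rfl
  | append_singleton E e ih =>
    obtain ⟨k, v⟩ := e
    rw [List.foldl_append, List.foldl_cons, List.foldl_nil]
    set d := E.foldl (fun d e => pyDictSetAdd d e.1 e.2) PySem.Dict.empty with hd
    set K := PySem.Set.ofList (E.map Prod.fst) with hK
    have hkeys : d.keys = K := by
      simp only [PySem.Dict.keys, ih, List.map_map]
      exact List.map_congr_left (fun k _ => rfl) |>.trans (List.map_id K)
    have hnd : d.keys.Nodup := hkeys ▸ PySem.Set.nodup_ofList _
    have hcont : d.contains k = decide (k ∈ K) := by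
      rw [PySem.Dict.contains_eq_decide_mem_keys, hkeys]
    by_cases hk : k ∈ K
    · -- existing key
      have hc : d.contains k = true := by rw [hcont]; simpa using hk
      have hget : d.getD k PySem.Set.empty
          = PySem.Set.ofList ((E.filter (fun e => e.1 == k)).map Prod.snd) := by
        apply PySem.Dict.getD_of_mem_items d (v := _) ?_ hnd
        rw [ih]
        exact List.mem_map.mpr ⟨k, hk, rfl⟩
      simp only [pyDictSetAdd, hc, if_true]
      rw [PySem.Dict.items_insert_of_contains _ _ hc, ih, List.map_map, hget]
      have hKmem : k ∈ E.map Prod.fst := by rwa [hK, PySem.Set.mem_ofList] at hk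
      rw [show PySem.Set.ofList ((E ++ [(k,v)]).map Prod.fst) = K by
        rw [List.map_append]; simp only [List.map_cons, List.map_nil]; rw [PySem.Set.ofList_append_singleton, ← hK]
        exact PySem.Set.add_of_mem hk]
      apply List.map_congr_left
      intro k' hk'
      by_cases hkk : k' = k
      · subst hkk
        simp only [Function.comp_def, beq_self_eq_true, if_pos]
        rw [List.filter_append, List.map_append, PySem.Set.ofList_append]
        simp [PySem.Set.update, PySem.Set.ofList_eq_foldl]
      · have : (k' == k) = false := by simpa using hkk
        simp only [Function.comp_def, this, Bool.false_eq_true, if_false]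
        rw [List.filter_append]
        have : ([((k : Int), (v : Int))].filter (fun e => e.1 == k')) = [] := by
          simp [Ne.symm hkk]
        rw [this, List.append_nil]
    · -- fresh key
      have hc : d.contains k = false := by rw [hcont]; simpa using hk
      have hKmem : k ∉ E.map Prod.fst := by rwa [hK, PySem.Set.mem_ofList] at hk
      simp only [pyDictSetAdd, hc, Bool.false_eq_true, if_false]
      rw [PySem.Dict.insert_insert_self, PySem.Dict.getD_insert_self,
        PySem.Dict.items_insert_of_not_contains _ _ hc, ih]
      rw [show PySem.Set.ofList ((E ++ [(k,v)]).map Prod.fst) = K ++ [k] by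
        rw [List.map_append]; simp only [List.map_cons, List.map_nil]; rw [PySem.Set.ofList_append_singleton, ← hK]
        exact PySem.Set.add_of_not_mem hk]
      rw [List.map_append]
      congr 1
      · apply List.map_congr_left
        intro k' hk'
        have hkk : ¬ k = k' := fun h => hk (h ▸ hk')
        rw [List.filter_append]
        have : ([((k : Int), (v : Int))].filter (fun e => e.1 == k')) = [] := by simp [hkk]
        rw [this, List.append_nil]
      · have hfilt : E.filter (fun e => e.1 == k) = [] := by
          rw [List.filter_eq_nil_iff]
          intro e he hbeq
          exact hKmem (List.mem_map.mpr ⟨e, he, by simpa using hbeq⟩)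
        simp [List.filter_append, hfilt, PySem.Set.ofList_eq_foldl, PySem.Set.add, PySem.Set.empty]

-- the fold of pyDictSetAdd over the projected event stream, characterised
theorem pv_fold_proj (qs : List (List Int)) (num : Int) (proj : Int × Int × Int → Int) :
    (((pvEvs qs num).map (fun e => (e.1, proj e))).foldl
        (fun d e => pyDictSetAdd d e.1 e.2) PySem.Dict.empty).items
      = pvC proj qs num := by
  rw [pv_main, pvC]
  simp only [List.map_map, List.filter_map, Function.comp_def]

theorem pvA_eq (qs : List (List Int)) (num : Int) :
    getRelEntCooccurrence qs num
      = [("subject", pvC (fun e => e.2.1) qs num), ("object", pvC (fun e => e.2.2) qs num)] := by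
  unfold getRelEntCooccurrence
  dsimp only
  rw [PySem.List.foldl_prod_mk
    (f := fun d ex => pyDictSetAdd (pyDictSetAdd d (PySem.List.pyGetD ex 1 0) (PySem.List.pyGetD ex 0 0)) (PySem.List.pyGetD ex 1 0 + num + 1) (PySem.List.pyGetD ex 2 0))
    (g := fun d ex => pyDictSetAdd (pyDictSetAdd d (PySem.List.pyGetD ex 1 0) (PySem.List.pyGetD ex 2 0)) (PySem.List.pyGetD ex 1 0 + num + 1) (PySem.List.pyGetD ex 0 0))]
  have h1 : (qs.foldl (fun d ex => pyDictSetAdd (pyDictSetAdd d (PySem.List.pyGetD ex 1 0) (PySem.List.pyGetD ex 0 0)) (PySem.List.pyGetD ex 1 0 + num + 1) (PySem.List.pyGetD ex 2 0)) PySem.Dict.empty)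
      = (((pvEvs qs num).map (fun e => (e.1, e.2.1))).foldl (fun d e => pyDictSetAdd d e.1 e.2) PySem.Dict.empty) := by
    rw [List.foldl_map, pvEvs, List.foldl_flatMap]
    simp only [pvEv, List.foldl_cons, List.foldl_nil]
  have h2 : (qs.foldl (fun d ex => pyDictSetAdd (pyDictSetAdd d (PySem.List.pyGetD ex 1 0) (PySem.List.pyGetD ex 2 0)) (PySem.List.pyGetD ex 1 0 + num + 1) (PySem.List.pyGetD ex 0 0)) PySem.Dict.empty)
      = (((pvEvs qs num).map (fun e => (e.1, e.2.2))).foldl (fun d e => pyDictSetAdd d e.1 e.2) PySem.Dict.empty) := by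
    rw [List.foldl_map, pvEvs, List.foldl_flatMap]
    simp only [pvEv, List.foldl_cons, List.foldl_nil]
  rw [h1, h2, pv_fold_proj, pv_fold_proj]

theorem pvB_keys (qs : List (List Int)) (num : Int) :
    (qs.foldl (fun (ks : List Int) ex =>
      [PySem.List.pyGetD ex 1 0, PySem.List.pyGetD ex 1 0 + num + 1].foldl
        (fun ks k => if ks.contains k then ks else ks ++ [k]) ks) [])
    = PySem.Set.ofList ((pvEvs qs num).map Prod.fst) := by
  have hstep : (fun (ks : List Int) k => if ks.contains k then ks else ks ++ [k]) = PySem.Set.add := by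
    funext ks k
    simp [PySem.Set.add]
  rw [hstep]
  have : (pvEvs qs num).map Prod.fst
      = qs.flatMap (fun ex => [PySem.List.pyGetD ex 1 0, PySem.List.pyGetD ex 1 0 + num + 1]) := by
    rw [pvEvs, List.map_flatMap]
    simp [pvEv]
  rw [this, PySem.Set.ofList_eq_foldl, List.foldl_flatMap]

theorem pvB_inner (qs : List (List Int)) (num k : Int) :
    (qs.foldl (fun (vs : List Int × List Int) ex =>
          let s := PySem.List.pyGetD ex 0 0
          let r := PySem.List.pyGetD ex 1 0
          let o := PySem.List.pyGetD ex 2 0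
          let vs := if r == k then (vs.1 ++ [s], vs.2 ++ [o]) else vs
          if r + num + 1 == k then (vs.1 ++ [o], vs.2 ++ [s]) else vs) ([], []))
      = (((pvEvs qs num).filter (fun e => e.1 == k)).map (fun e => e.2.1),
         ((pvEvs qs num).filter (fun e => e.1 == k)).map (fun e => e.2.2)) := by
  have hstep : (fun (vs : List Int × List Int) (ex : List Int) =>
          let s := PySem.List.pyGetD ex 0 0
          let r := PySem.List.pyGetD ex 1 0
          let o := PySem.List.pyGetD ex 2 0
          let vs := if r == k then (vs.1 ++ [s], vs.2 ++ [o]) else vs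
          if r + num + 1 == k then (vs.1 ++ [o], vs.2 ++ [s]) else vs)
      = (fun vs ex => ((pvEv num ex).foldl (fun l e => if e.1 == k then l ++ [e.2.1] else l) vs.1,
                       (pvEv num ex).foldl (fun l e => if e.1 == k then l ++ [e.2.2] else l) vs.2)) := by
    funext vs ex
    simp only [pvEv, List.foldl_cons, List.foldl_nil]
    split_ifs <;> rfl
  rw [hstep]
  rw [PySem.List.foldl_prod_mk
    (f := fun l ex => (pvEv num ex).foldl (fun l e => if e.1 == k then l ++ [e.2.1] else l) l)
    (g := fun l ex => (pvEv num ex).foldl (fun l e => if e.1 == k then l ++ [e.2.2] else l) l)]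
  rw [← List.foldl_flatMap, ← List.foldl_flatMap]
  simp only [PySem.List.foldl_append_if, List.nil_append, pvEvs]

theorem pvB_eq (qs : List (List Int)) (num : Int) :
    getRelEntCooccurrence_alt qs num
      = [("subject", pvC (fun e => e.2.1) qs num), ("object", pvC (fun e => e.2.2) qs num)] := by
  unfold getRelEntCooccurrence_alt
  dsimp only
  rw [pvB_keys]
  have hstep : (fun (st : PySem.Dict Int (PySem.Set Int) × PySem.Dict Int (PySem.Set Int)) k =>
      let vs := qs.foldl (fun (vs : List Int × List Int) ex =>
          let s := PySem.List.pyGetD ex 0 0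
          let r := PySem.List.pyGetD ex 1 0
          let o := PySem.List.pyGetD ex 2 0
          let vs := if r == k then (vs.1 ++ [s], vs.2 ++ [o]) else vs
          if r + num + 1 == k then (vs.1 ++ [o], vs.2 ++ [s]) else vs) ([], [])
      (st.1.insert k (PySem.Set.ofList vs.1), st.2.insert k (PySem.Set.ofList vs.2)))
    = fun st k =>
      (st.1.insert k (PySem.Set.ofList (((pvEvs qs num).filter (fun e => e.1 == k)).map (fun e => e.2.1))),
       st.2.insert k (PySem.Set.ofList (((pvEvs qs num).filter (fun e => e.1 == k)).map (fun e => e.2.2)))) := by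
    funext st k
    rw [pvB_inner]
  rw [hstep]
  rw [PySem.List.foldl_prod_mk
    (f := fun d k => PySem.Dict.insert d k (PySem.Set.ofList (((pvEvs qs num).filter (fun e => e.1 == k)).map (fun e => e.2.1))))
    (g := fun d k => PySem.Dict.insert d k (PySem.Set.ofList (((pvEvs qs num).filter (fun e => e.1 == k)).map (fun e => e.2.2))))]
  rw [PySem.Dict.items_foldl_insert_fresh _ (fun a => a) _ _
      (fun a _ => by simp [PySem.Dict.contains_empty]) (by simp),
      PySem.Dict.items_foldl_insert_fresh _ (fun a => a) _ _
      (fun a _ => by simp [PySem.Dict.contains_empty]) (by simp)]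
  simp [pvC]
  rfl

-- ===== VERDICT (by name: the statement is the Claim_ definition above) =====
theorem getRelEntCooccurrence_spec : Claim_equal_getRelEntCooccurrence := by
  intro quadruples num_rels _ _
  unfold Spec_getRelEntCooccurrence
  rw [pvA_eq, pvB_eq]
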